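-- pv_equiv track=rewrite | github.com/TomDufall/prog-puzzles | aoc/2022/08/part2.py | get_visible_trees_1d
-- ===== SOURCE A (Python) =====
-- from typing import Iterable
--
-- def get_visible_trees_1d(row: Iterable[int]) -> set[int]:
--     max_height = -1
--     visible = set()
--     for i, height in enumerate(row):
--         if height > max_height:
--             visible.add(i)
--             max_height = height
--     return visible
-- ===== SOURCE B (Python) =====
-- def get_visible_trees_1d(row):
--     # Phase 1: prefix-maximum table seeded with the -1 floor.
--     prefixes = [-1]
--     for height in row:
--         prefixes.append(max(prefixes[-1], height))
--     # Phase 2: an index is visible iff the running maximum strictly increased there.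
--     return {i for i, (a, b) in enumerate(zip(prefixes, prefixes[1:])) if b > a}
-- ===== Notes on version B (the rewrite author's own statement) =====
-- stated objective: alternative
-- what changed: A's single fused loop (running max + conditional set-insert) is split into building a prefix-maximum table and then a separate adjacent-pair scan over the table selecting indices where the running maximum strictly increased.
import Mathlib
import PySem

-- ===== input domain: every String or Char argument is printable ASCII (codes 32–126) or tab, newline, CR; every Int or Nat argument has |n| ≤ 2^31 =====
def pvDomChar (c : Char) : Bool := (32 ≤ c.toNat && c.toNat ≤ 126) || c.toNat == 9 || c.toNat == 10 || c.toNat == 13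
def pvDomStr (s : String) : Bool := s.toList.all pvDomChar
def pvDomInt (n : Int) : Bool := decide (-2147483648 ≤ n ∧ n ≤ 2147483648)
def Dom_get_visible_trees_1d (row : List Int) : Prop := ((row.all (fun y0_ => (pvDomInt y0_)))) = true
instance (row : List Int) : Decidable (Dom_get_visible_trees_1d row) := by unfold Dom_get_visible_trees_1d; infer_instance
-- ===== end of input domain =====

-- B splits A's fused running-max loop into a prefix-maximum table phase plus an
-- adjacent-pair scan selecting the indices where the running maximum strictly increased
-- (alternative decomposition, same O(n) cost). Return value only (A mutates nothing).

-- ===== PORT A =====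
-- the for-loop of A: state = (max_height, visible), iterating over enumerate(row)
def pvLoopA : List (Int × Int) → Int → PySem.Set Int → PySem.Set Int
  | [], _, visible => visible
  | (i, height) :: rest, max_height, visible =>
      if height > max_height then pvLoopA rest height (PySem.Set.add visible i)
      else pvLoopA rest max_height visible

def get_visible_trees_1d (row : List Int) : List Int :=
  pvLoopA (PySem.List.enumerate row 0) (-1) PySem.Set.empty

-- ===== PORT B =====
-- phase 1 loop body: prefixes.append(max(prefixes[-1], height))
def get_visible_trees_1d_alt (row : List Int) : List Int :=
  let prefixes := row.foldl (fun acc height => acc ++ [max (PySem.List.pyGetD acc (-1) 0) height]) [-1]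
  PySem.Set.ofList
    (((PySem.List.enumerate (prefixes.zip (PySem.List.slice prefixes (some 1) none)) 0).filter
        (fun p => p.2.2 > p.2.1)).map (·.1))

-- ===== PRECONDITION & SPEC =====
def Spec_get_visible_trees_1d (row : List Int) (out : List Int) : Prop := out = get_visible_trees_1d_alt row
instance (row : List Int) (out : List Int) : Decidable (Spec_get_visible_trees_1d row out) := by unfold Spec_get_visible_trees_1d; infer_instance

-- ===== CLAIM (what is proved, stated in full; the proofs are below) =====
def Claim_equal_get_visible_trees_1d : Prop := ∀ (row : List Int), Dom_get_visible_trees_1d row → Spec_get_visible_trees_1d row (get_visible_trees_1d row)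

-- ===== LEMMAS AND PROOFS =====

-- phase 1 of B builds exactly List.scanl max (-1) row
theorem pvFoldB_eq_scanl (row acc : List Int) (m : Int) :
    row.foldl (fun acc height => acc ++ [max (PySem.List.pyGetD acc (-1) 0) height]) (acc ++ [m])
      = acc ++ List.scanl max m row := by
  induction row generalizing acc m with
  | nil => simp
  | cons h t ih =>
      simp only [List.foldl_cons, List.scanl_cons, PySem.List.pyGetD_neg_one_append_singleton]
      have := ih (acc ++ [m]) (max m h)
      rw [List.append_assoc] at this
      simpa using this

-- B's phase-2 result as a function of the running maximum and the start index
def pvF (s : Int) (m : Int) (row : List Int) : List Int :=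
  ((PySem.List.enumerate ((List.scanl max m row).zip (List.scanl max m row).tail) s).filter
      (fun p => p.2.2 > p.2.1)).map (·.1)

theorem pvF_nil (s m : Int) : pvF s m [] = [] := by simp [pvF]

theorem pvF_cons (s m h : Int) (t : List Int) :
    pvF s m (h :: t) = (if h > m then [s] else []) ++ pvF (s + 1) (max m h) t := by
  simp only [pvF, List.scanl_cons, List.tail_cons]
  have hzip : (m :: List.scanl max (max m h) t).zip (List.scanl max (max m h) t)
      = (m, max m h) :: (List.scanl max (max m h) t).zip (List.scanl max (max m h) t).tail := by
    cases t <;> simp [List.scanl]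
  rw [hzip, PySem.List.enumerate_cons]
  by_cases hc : h > m
  · have : max m h > m := by omega
    simp [hc, this]
  · have : ¬ (max m h > m) := by omega
    simp [this]
    omega

theorem pvLoopA_eq (row : List Int) (s m : Int) (vis : List Int)
    (hv : ∀ x ∈ vis, x < s) :
    pvLoopA (PySem.List.enumerate row s) m vis = vis ++ pvF s m row := by
  induction row generalizing s m vis with
  | nil => simp [pvLoopA, pvF_nil]
  | cons h t ih =>
      rw [PySem.List.enumerate_cons, pvF_cons]
      by_cases hc : h > m
      · have hns : s ∉ vis := fun hmem => absurd (hv s hmem) (lt_irrefl s)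
        have hadd : PySem.Set.add vis s = vis ++ [s] := PySem.Set.add_of_not_mem hns
        have hmax : max m h = h := by omega
        simp only [pvLoopA, if_pos hc, hadd, hmax]
        rw [ih (s + 1) h (vis ++ [s]) (by
          intro x hx
          rcases List.mem_append.mp hx with hx | hx
          · exact lt_trans (hv x hx) (by omega)
          · simp at hx; omega)]
        simp [List.append_assoc]
      · have hmax : max m h = m := by omega
        simp only [pvLoopA, if_neg hc, hmax]
        rw [ih (s + 1) m vis (fun x hx => lt_trans (hv x hx) (by omega))]
        simp

theorem pvF_pairwise (s m : Int) (row : List Int) : (pvF s m row).Pairwise (· < ·) := by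
  unfold pvF
  exact ((PySem.List.pairwise_lt_enumerate _ _).filter _).map _ (fun _ _ h => h)

theorem pvF_nodup (s m : Int) (row : List Int) : (pvF s m row).Nodup :=
  (pvF_pairwise s m row).imp (fun h => ne_of_lt h)

-- ===== VERDICT (by name: the statement is the Claim_ definition above) =====
theorem get_visible_trees_1d_spec : Claim_equal_get_visible_trees_1d := by
  intro row _
  unfold Spec_get_visible_trees_1d get_visible_trees_1d get_visible_trees_1d_alt
  have h1 : row.foldl (fun acc height => acc ++ [max (PySem.List.pyGetD acc (-1) 0) height]) [-1]
      = List.scanl max (-1) row := by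
    simpa using pvFoldB_eq_scanl row [] (-1)
  simp only [h1, PySem.List.slice_from_one]
  have he : (PySem.Set.empty : PySem.Set Int) = [] := rfl
  rw [he, pvLoopA_eq row 0 (-1) [] (by simp), List.nil_append]
  show pvF 0 (-1) row = PySem.Set.ofList (pvF 0 (-1) row)
  exact (PySem.Set.ofList_eq_self_of_nodup _ (pvF_nodup 0 (-1) row)).symm
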